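-- pv_equiv track=rewrite | github.com/RDdhara/LeetCode | Matrix/3567. Minimum Absolute Difference in Sliding Submatrix.py | minAbsDiff
-- ===== SOURCE A (Python) =====
-- from typing import List
--
-- def minAbsDiff(grid: List[List[int]], k: int) -> List[List[int]]:
--     m = len(grid)
--     n = len(grid[0])
--
--     ans = [[0] * (n - k + 1) for _ in range(m - k + 1)]
--
--     for r in range(m-k+1):
--         for c in range(n-k+1):
--             temp = []
--             for i in range(r, r+k):
--                 for j in range(c,c+k):
--                     temp.append(grid[i][j])
--
--             if k == 1:
--                 ans[r][c] = 0
--                 continue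
--
--             temp = sorted(set(temp))
--             if len(temp) <= 1:
--                 ans[r][c] = 0
--                 continue
--
--             mini = float('inf')
--
--             for x in range(1, len(temp)):
--                 mini = min(mini, abs(temp[x] - temp[x-1]))
--
--             ans[r][c] = mini
--
--     return ans
-- ===== SOURCE B (Python) =====
-- from typing import List
--
-- def minAbsDiff(grid: List[List[int]], k: int) -> List[List[int]]:
--     m = len(grid)
--     n = len(grid[0])
--     out = []
--     for r in range(m - k + 1):
--         row = []
--         for c in range(n - k + 1):
--             cells = [grid[i][j] for i in range(r, r + k) for j in range(c, c + k)]
--             best = None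
--             for idx in range(len(cells)):
--                 x = cells[idx]
--                 for y in cells[idx + 1:]:
--                     if x != y:
--                         d = x - y if x > y else y - x
--                         if best is None or d < best:
--                             best = d
--             row.append(0 if best is None else best)
--         out.append(row)
--     return out
-- ===== Notes on version B (the rewrite author's own statement) =====
-- stated objective: alternative
-- what changed: B removes A's per-window sort + set-dedup + indexed adjacent-gap scan entirely: each window's answer is computed as the minimum |x-y| over all pairs of unequal cells in one pairwise pass with a running best (correct because the minimum gap between adjacent sorted distinct values equals the minimum pairwise difference of unequal values).
import Mathlib
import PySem

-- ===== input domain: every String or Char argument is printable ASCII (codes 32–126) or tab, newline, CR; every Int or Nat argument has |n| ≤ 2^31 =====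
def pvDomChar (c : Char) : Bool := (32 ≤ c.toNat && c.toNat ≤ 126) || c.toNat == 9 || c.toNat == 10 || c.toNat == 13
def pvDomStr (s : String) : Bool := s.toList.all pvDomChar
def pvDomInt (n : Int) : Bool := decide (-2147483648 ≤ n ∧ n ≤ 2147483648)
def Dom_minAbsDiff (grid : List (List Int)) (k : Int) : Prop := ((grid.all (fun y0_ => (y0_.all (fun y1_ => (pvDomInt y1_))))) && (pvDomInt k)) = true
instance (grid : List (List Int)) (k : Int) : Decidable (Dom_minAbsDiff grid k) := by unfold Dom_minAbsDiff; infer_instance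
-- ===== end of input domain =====

-- B replaces A's per-window sort + set-dedup + adjacent-gap scan by a single pairwise pass: the
-- minimum |x-y| over all pairs of unequal window cells, tracked with a running best (alternative
-- algorithm, no sorting; equal because the min adjacent gap of sorted distinct values is the min
-- pairwise difference of unequal values).

-- ===== PORT A =====
-- Python's running `mini = min(mini, d)` starting from float('inf'): modelled as Option Int, none = inf.
def pvInfMin (mini : Option Int) (d : Int) : Option Int :=
  match mini with
  | none => some d
  | some mv => some (min mv d)

-- ans is preallocated and then assigned cell by cell in loop order; ported as maps over the same ranges.
def minAbsDiff (grid : List (List Int)) (k : Int) : List (List Int) :=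
  let m : Int := (grid.length : Int)
  -- grid[0]: IndexError on empty grid, excluded by Pre_
  let n : Int := (((PySem.List.pyGet? grid 0).getD []).length : Int)
  (PySem.List.pyRange 0 (m - k + 1) 1).map (fun r =>
    (PySem.List.pyRange 0 (n - k + 1) 1).map (fun c =>
      let temp : List Int := (PySem.List.pyRange r (r + k) 1).foldl (fun acc i =>
        (PySem.List.pyRange c (c + k) 1).foldl (fun acc2 j =>
          acc2 ++ [PySem.List.pyGetD (PySem.List.pyGetD grid i []) j 0]) acc) []
      if k = 1 then 0
      else
        let t : List Int := PySem.List.sorted (PySem.Set.ofList temp) (fun x => x) false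
        if (t.length : Int) ≤ 1 then 0
        else
          -- len t ≥ 2 here, so the loop runs ≥ once and mini is an int, returned via getD
          ((PySem.List.pyRange 1 (t.length : Int) 1).foldl
            (fun mini x => pvInfMin mini |PySem.List.pyGetD t x 0 - PySem.List.pyGetD t (x - 1) 0|)
            none).getD 0))

-- ===== PORT B =====
-- one comparison of B's inner loop body: x against one later cell y, updating the running best
def pvPairStep (x : Int) (best : Option Int) (y : Int) : Option Int :=
  if x ≠ y then
    let d := if x > y then x - y else y - x
    match best with
    | none => some d
    | some b => if d < b then some d else best
  else best

-- B's `for idx in range(len(cells)): x = cells[idx]; for y in cells[idx+1:] …`: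
-- structural recursion over the suffixes of cells
def pvPairs : List Int → Option Int → Option Int
  | [], best => best
  | x :: rest, best => pvPairs rest (rest.foldl (pvPairStep x) best)

def minAbsDiff_alt (grid : List (List Int)) (k : Int) : List (List Int) :=
  let m : Int := (grid.length : Int)
  let n : Int := (((PySem.List.pyGet? grid 0).getD []).length : Int)
  (PySem.List.pyRange 0 (m - k + 1) 1).map (fun r =>
    (PySem.List.pyRange 0 (n - k + 1) 1).map (fun c =>
      let cells : List Int := (PySem.List.pyRange r (r + k) 1).flatMap (fun i =>
        (PySem.List.pyRange c (c + k) 1).map (fun j =>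
          PySem.List.pyGetD (PySem.List.pyGetD grid i []) j 0))
      (pvPairs cells none).getD 0))

-- ===== PRECONDITION & SPEC =====
-- Pre_ excludes exactly the inputs where A raises: the empty grid (grid[0] IndexError), and ragged
-- grids with a row shorter than row 0 when 1 ≤ k ≤ both dimensions (grid[i][j] IndexError).
def Pre_minAbsDiff (grid : List (List Int)) (k : Int) : Prop :=
  grid ≠ [] ∧
    (1 ≤ k ∧ k ≤ (grid.length : Int) ∧ k ≤ (grid.headI.length : Int) →
      ∀ row ∈ grid, grid.headI.length ≤ row.length)
instance (grid : List (List Int)) (k : Int) : Decidable (Pre_minAbsDiff grid k) := by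
  unfold Pre_minAbsDiff; infer_instance

def pvWitness_minAbsDiff : List (List Int) × Int := ([[1, 2, 3], [4, 0, 6], [7, 8, 9]], 2)

def Spec_minAbsDiff (grid : List (List Int)) (k : Int) (out : List (List Int)) : Prop := out = minAbsDiff_alt grid k
instance (grid : List (List Int)) (k : Int) (out : List (List Int)) : Decidable (Spec_minAbsDiff grid k out) := by unfold Spec_minAbsDiff; infer_instance

-- ===== CLAIM (what is proved, stated in full; the proofs are below) =====
def Claim_equal_minAbsDiff : Prop := ∀ (grid : List (List Int)) (k : Int), Dom_minAbsDiff grid k → Pre_minAbsDiff grid k → Spec_minAbsDiff grid k (minAbsDiff grid k)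

-- ===== LEMMAS AND PROOFS =====

theorem minAbsDiff_witness_ok :
    Dom_minAbsDiff pvWitness_minAbsDiff.1 pvWitness_minAbsDiff.2 ∧
    Pre_minAbsDiff pvWitness_minAbsDiff.1 pvWitness_minAbsDiff.2 := by
  constructor <;> decide

-- the pair-differences of a list: every |x - y| with x, y unequal members
def pvPairsP (l : List Int) (d : Int) : Prop :=
  ∃ x ∈ l, ∃ y ∈ l, x ≠ y ∧ d = |x - y|

-- the adjacent gaps of a :: s (as absolute values)
def pvGapsP : Int → List Int → Int → Prop
  | _, [], _ => False
  | a, b :: s, d => d = |b - a| ∨ pvGapsP b s d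

-- o is the minimum of the (possibly empty) set P, none meaning P is empty
def pvIsMin (P : Int → Prop) (o : Option Int) : Prop :=
  match o with
  | none => ∀ d, ¬ P d
  | some m => P m ∧ ∀ d, P d → m ≤ d

theorem pvIsMin_unique {P : Int → Prop} {o₁ o₂ : Option Int}
    (h₁ : pvIsMin P o₁) (h₂ : pvIsMin P o₂) : o₁ = o₂ := by
  cases o₁ with
  | none =>
    cases o₂ with
    | none => rfl
    | some m => exact absurd h₂.1 (h₁ m)
  | some m =>
    cases o₂ with
    | none => exact absurd h₁.1 (h₂ m)
    | some m' => exact congrArg some (le_antisymm (h₁.2 m' h₂.1) (h₂.2 m h₁.1))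

theorem pvIsMin_congr {P Q : Int → Prop} {o : Option Int}
    (h : ∀ d, P d ↔ Q d) (hm : pvIsMin P o) : pvIsMin Q o := by
  cases o with
  | none => exact fun d hq => hm d ((h d).mpr hq)
  | some m => exact ⟨(h m).mp hm.1, fun d hq => hm.2 d ((h d).mpr hq)⟩

theorem pvIfAbs (x y : Int) : (if x > y then x - y else y - x) = |x - y| := by
  by_cases h : x > y
  · rw [if_pos h, abs_of_pos (by omega)]
  · rw [if_neg h, abs_of_nonpos (by omega)]; ring

-- one update of the running best is the min of "one more candidate"
theorem pvPairStep_min {E : Int → Prop} {o : Option Int} (x y : Int)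
    (h : pvIsMin E o) :
    pvIsMin (fun d => E d ∨ (x ≠ y ∧ d = |x - y|)) (pvPairStep x o y) := by
  unfold pvPairStep
  by_cases hxy : x ≠ y
  · rw [if_pos hxy, pvIfAbs]
    cases o with
    | none =>
      show pvIsMin _ (some |x - y|)
      refine ⟨Or.inr ⟨hxy, rfl⟩, ?_⟩
      rintro d (hd | ⟨-, rfl⟩)
      · exact absurd hd (h d)
      · exact le_refl _
    | some b =>
      show pvIsMin _ (if |x - y| < b then some |x - y| else some b)
      by_cases hlt : |x - y| < b
      · rw [if_pos hlt]
        refine ⟨Or.inr ⟨hxy, rfl⟩, ?_⟩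
        rintro d (hd | ⟨-, rfl⟩)
        · exact le_trans (le_of_lt hlt) (h.2 d hd)
        · exact le_refl _
      · rw [if_neg hlt]
        refine ⟨Or.inl h.1, ?_⟩
        rintro d (hd | ⟨-, rfl⟩)
        · exact h.2 d hd
        · omega
  · rw [if_neg hxy]
    apply pvIsMin_congr _ h
    intro d
    constructor
    · exact Or.inl
    · rintro (hd | ⟨hne, -⟩)
      · exact hd
      · exact absurd hne hxy

theorem pvInnerFold_min (x : Int) (rest : List Int) :
    ∀ (E : Int → Prop) (o : Option Int), pvIsMin E o →
      pvIsMin (fun d => E d ∨ ∃ y ∈ rest, x ≠ y ∧ d = |x - y|)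
        (rest.foldl (pvPairStep x) o) := by
  induction rest with
  | nil =>
    intro E o h
    simp only [List.foldl_nil]
    apply pvIsMin_congr _ h
    intro d
    simp
  | cons y ys ih =>
    intro E o h
    simp only [List.foldl_cons]
    have h1 := pvPairStep_min x y h
    have h2 := ih _ _ h1
    apply pvIsMin_congr _ h2
    intro d
    constructor
    · rintro ((hd | ⟨hne, rfl⟩) | ⟨z, hz, hne, rfl⟩)
      · exact Or.inl hd
      · exact Or.inr ⟨y, List.mem_cons_self, hne, rfl⟩
      · exact Or.inr ⟨z, List.mem_cons_of_mem _ hz, hne, rfl⟩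
    · rintro (hd | ⟨z, hz, hne, rfl⟩)
      · exact Or.inl (Or.inl hd)
      · rcases List.mem_cons.mp hz with rfl | hz'
        · exact Or.inl (Or.inr ⟨hne, rfl⟩)
        · exact Or.inr ⟨z, hz', hne, rfl⟩

theorem pvPairs_min (l : List Int) :
    ∀ (E : Int → Prop) (o : Option Int), pvIsMin E o →
      pvIsMin (fun d => E d ∨ pvPairsP l d) (pvPairs l o) := by
  induction l with
  | nil =>
    intro E o h
    apply pvIsMin_congr _ h
    intro d
    simp [pvPairsP]
  | cons x rest ih =>
    intro E o h
    show pvIsMin _ (pvPairs rest (rest.foldl (pvPairStep x) o))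
    have h1 := pvInnerFold_min x rest E o h
    have h2 := ih _ _ h1
    apply pvIsMin_congr _ h2
    intro d
    constructor
    · rintro ((hd | ⟨y, hy, hne, rfl⟩) | ⟨u, hu, v, hv, hne, rfl⟩)
      · exact Or.inl hd
      · exact Or.inr ⟨x, List.mem_cons_self, y, List.mem_cons_of_mem _ hy, hne, rfl⟩
      · exact Or.inr ⟨u, List.mem_cons_of_mem _ hu, v, List.mem_cons_of_mem _ hv, hne, rfl⟩
    · rintro (hd | ⟨u, hu, v, hv, hne, rfl⟩)
      · exact Or.inl (Or.inl hd)
      · rcases List.mem_cons.mp hu with rfl | hu'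
        · rcases List.mem_cons.mp hv with rfl | hv'
          · exact absurd rfl hne
          · exact Or.inl (Or.inr ⟨v, hv', hne, rfl⟩)
        · rcases List.mem_cons.mp hv with rfl | hv'
          · exact Or.inl (Or.inr ⟨u, hu', fun h => hne h.symm, by rw [abs_sub_comm]⟩)
          · exact Or.inr ⟨u, hu', v, hv', hne, rfl⟩

-- A's loop over indices 1..len t, rewritten recursively over t (gap fold)
def pvGfold (a : Int) : List Int → Option Int → Option Int
  | [], o => o
  | b :: t, o => pvGfold b t (pvInfMin o |b - a|)

theorem pvGfold_isMin (s : List Int) :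
    ∀ (a : Int) (E : Int → Prop) (o : Option Int), pvIsMin E o →
      pvIsMin (fun d => E d ∨ pvGapsP a s d) (pvGfold a s o) := by
  induction s with
  | nil =>
    intro a E o h
    apply pvIsMin_congr _ h
    intro d
    simp [pvGapsP]
  | cons b s ih =>
    intro a E o h
    show pvIsMin _ (pvGfold b s (pvInfMin o |b - a|))
    have h1 : pvIsMin (fun d => E d ∨ d = |b - a|) (pvInfMin o |b - a|) := by
      cases o with
      | none =>
        refine ⟨Or.inr rfl, ?_⟩
        rintro d (hd | rfl)
        · exact absurd hd (h d)
        · exact le_refl _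
      | some m =>
        show pvIsMin _ (some (min m |b - a|))
        constructor
        · rcases min_cases m |b - a| with ⟨he, -⟩ | ⟨he, -⟩
          · rw [he]; exact Or.inl h.1
          · rw [he]; exact Or.inr rfl
        · rintro d (hd | rfl)
          · exact le_trans (min_le_left _ _) (h.2 d hd)
          · exact min_le_right _ _
    have h2 := ih b _ _ h1
    apply pvIsMin_congr _ h2
    intro d
    constructor
    · rintro ((hd | rfl) | hg)
      · exact Or.inl hd
      · exact Or.inr (Or.inl rfl)
      · exact Or.inr (Or.inr hg)
    · rintro (hd | (rfl | hg))
      · exact Or.inl (Or.inl hd)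
      · exact Or.inl (Or.inr rfl)
      · exact Or.inr hg

theorem pvGetD_cons_shift (a : Int) (t : List Int) (x d : Int) (hx : 0 ≤ x) :
    PySem.List.pyGetD (a :: t) (x + 1) d = PySem.List.pyGetD t x d := by
  show (PySem.List.pyGet? (a :: t) (x + 1)).getD d = (PySem.List.pyGet? t x).getD d
  rw [PySem.List.pyGet?_of_nonneg _ (by omega), PySem.List.pyGet?_of_nonneg _ hx]
  have h : (x + 1).toNat = x.toNat + 1 := by omega
  simp [h]

theorem pvRange_shift (a b : Int) :
    PySem.List.pyRange (a + 1) (b + 1) 1 = (PySem.List.pyRange a b 1).map (fun x => x + 1) := by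
  rw [PySem.List.pyRange_one, PySem.List.pyRange_one, List.map_map]
  have h : b + 1 - (a + 1) = b - a := by ring
  rw [h]
  apply List.map_congr_left
  intro x _
  simp
  ring

-- A's indexed loop over 1..len (a::t) IS the recursive gap fold
theorem pvIdxFold (t : List Int) : ∀ (a : Int) (o : Option Int),
    ((PySem.List.pyRange 1 (((a :: t).length : Int)) 1).foldl
      (fun mini x => pvInfMin mini |PySem.List.pyGetD (a :: t) x 0 - PySem.List.pyGetD (a :: t) (x - 1) 0|)
      o)
    = pvGfold a t o := by
  induction t with
  | nil =>
    intro a o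
    rw [PySem.List.pyRange_one_eq_nil (by simp)]
    simp [pvGfold]
  | cons b t ih =>
    intro a o
    have hlen : (((a :: b :: t).length : Int)) = ((t.length : Int) + 1) + 1 := by
      simp only [List.length_cons]; push_cast; ring
    rw [hlen, PySem.List.pyRange_one_cons (by omega)]
    simp only [List.foldl_cons]
    have h1 : PySem.List.pyGetD (a :: b :: t) (1 : Int) 0 = b := by
      show (PySem.List.pyGet? (a :: b :: t) 1).getD 0 = b
      rw [PySem.List.pyGet?_of_nonneg _ (by norm_num)]
      rfl
    have h0 : PySem.List.pyGetD (a :: b :: t) ((1 : Int) - 1) 0 = a := by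
      show (PySem.List.pyGet? (a :: b :: t) (1 - 1)).getD 0 = a
      rw [PySem.List.pyGet?_of_nonneg _ (by norm_num)]
      rfl
    rw [h1, h0]
    rw [pvRange_shift 1 ((t.length : Int) + 1), List.foldl_map]
    rw [PySem.List.foldl_congr_mem _ _
      (fun mini x => pvInfMin mini |PySem.List.pyGetD (b :: t) x 0 - PySem.List.pyGetD (b :: t) (x - 1) 0|) _
      (by
        intro acc x hx
        have hb := PySem.List.mem_pyRange_one.mp hx
        have e1 : PySem.List.pyGetD (a :: b :: t) (x + 1) 0 = PySem.List.pyGetD (b :: t) x 0 :=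
          pvGetD_cons_shift _ _ _ _ (by omega)
        have e2 : PySem.List.pyGetD (a :: b :: t) (x + 1 - 1) 0 = PySem.List.pyGetD (b :: t) (x - 1) 0 := by
          have hx1 : x + 1 - 1 = (x - 1) + 1 := by ring
          rw [hx1, pvGetD_cons_shift _ _ _ _ (by omega)]
        rw [e1, e2])]
    have hlen2 : ((t.length : Int) + 1) = (((b :: t).length : Int)) := by simp
    rw [hlen2, ih b (pvInfMin o |b - a|)]
    rfl

-- every member of a strictly sorted b :: s is ≥ b
theorem pvMemGe {b : Int} {s : List Int} (hp : (b :: s).Pairwise (· < ·))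
    {v : Int} (hv : v ∈ b :: s) : b ≤ v := by
  rcases List.mem_cons.mp hv with rfl | hv'
  · exact le_refl _
  · exact le_of_lt ((List.pairwise_cons.mp hp).1 v hv')

-- in a strictly sorted list, every pair difference dominates some adjacent gap
theorem pvPairDomGap (s : List Int) : ∀ (a : Int), (a :: s).Pairwise (· < ·) →
    ∀ u v, u ∈ a :: s → v ∈ a :: s → u < v → ∃ g, pvGapsP a s g ∧ g ≤ v - u := by
  induction s with
  | nil =>
    intro a _ u v hu hv huv
    simp only [List.mem_singleton] at hu hv
    subst hu; subst hv
    exact absurd huv (lt_irrefl _)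
  | cons b s ih =>
    intro a hp u v hu hv huv
    have hab : a < b := (List.pairwise_cons.mp hp).1 b List.mem_cons_self
    have hbs : (b :: s).Pairwise (· < ·) := (List.pairwise_cons.mp hp).2
    rcases List.mem_cons.mp hu with hua | hu'
    · -- u = a: first gap works since v ≥ b
      have hvb : v ∈ b :: s := by
        rcases List.mem_cons.mp hv with hva | hv'
        · omega
        · exact hv'
      refine ⟨|b - a|, Or.inl rfl, ?_⟩
      have hvge : b ≤ v := pvMemGe hbs hvb
      rw [abs_of_pos (by omega)]
      omega
    · -- u ∈ b :: s, hence v ∈ b :: s too; recurse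
      have hua : a < u := (List.pairwise_cons.mp hp).1 u hu'
      have hvb : v ∈ b :: s := by
        rcases List.mem_cons.mp hv with rfl | hv'
        · exact absurd (lt_trans hua huv) (lt_irrefl _)
        · exact hv'
      obtain ⟨g, hg, hle⟩ := ih b hbs u v hu' hvb huv
      exact ⟨g, Or.inr hg, hle⟩

-- every adjacent gap of a strictly sorted list is a pair difference
theorem pvGapIsPair (s : List Int) : ∀ (a : Int), (a :: s).Pairwise (· < ·) →
    ∀ d, pvGapsP a s d → pvPairsP (a :: s) d := by
  induction s with
  | nil => intro a _ d hd; exact absurd hd id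
  | cons b s ih =>
    intro a hp d hd
    have hab : a < b := (List.pairwise_cons.mp hp).1 b List.mem_cons_self
    have hbs : (b :: s).Pairwise (· < ·) := (List.pairwise_cons.mp hp).2
    rcases hd with rfl | hd'
    · exact ⟨b, List.mem_cons_of_mem _ List.mem_cons_self, a, List.mem_cons_self,
        by omega, by rw [abs_sub_comm]⟩
    · obtain ⟨x, hx, y, hy, hne, he⟩ := ih b hbs d hd'
      exact ⟨x, List.mem_cons_of_mem _ hx, y, List.mem_cons_of_mem _ hy, hne, he⟩

-- hence the min of the gaps is the min of the pair differences
theorem pvGapsMin_to_PairsMin {a : Int} {s : List Int} {o : Option Int}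
    (hp : (a :: s).Pairwise (· < ·))
    (h : pvIsMin (pvGapsP a s) o) : pvIsMin (pvPairsP (a :: s)) o := by
  cases o with
  | none =>
    intro d hd
    obtain ⟨x, hx, y, hy, hne, rfl⟩ := hd
    rcases Int.lt_or_lt_of_ne hne with hlt | hlt
    · obtain ⟨g, hg, -⟩ := pvPairDomGap s a hp x y hx hy hlt
      exact h g hg
    · obtain ⟨g, hg, -⟩ := pvPairDomGap s a hp y x hy hx hlt
      exact h g hg
  | some m =>
    refine ⟨pvGapIsPair s a hp m h.1, ?_⟩
    rintro d ⟨x, hx, y, hy, hne, rfl⟩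
    rcases Int.lt_or_lt_of_ne hne with hlt | hlt
    · obtain ⟨g, hg, hle⟩ := pvPairDomGap s a hp x y hx hy hlt
      have := h.2 g hg
      rw [abs_of_neg (by omega)]
      omega
    · obtain ⟨g, hg, hle⟩ := pvPairDomGap s a hp y x hy hx hlt
      have := h.2 g hg
      rw [abs_of_pos (by omega)]
      omega

-- pair differences only depend on the members
theorem pvPairsP_mono {l t : List Int} (h : ∀ x, x ∈ l → x ∈ t) :
    ∀ d, pvPairsP l d → pvPairsP t d := by
  rintro d ⟨x, hx, y, hy, hne, rfl⟩
  exact ⟨x, h x hx, y, h y hy, hne, rfl⟩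

theorem pvPairsP_congr {l t : List Int} (h : ∀ x, x ∈ l ↔ x ∈ t) :
    ∀ d, pvPairsP l d ↔ pvPairsP t d := by
  intro d
  exact ⟨pvPairsP_mono (fun x => (h x).mp) d, pvPairsP_mono (fun x => (h x).mpr) d⟩

-- B's pairwise pass computes the min pair difference
theorem pvPairs_isMin (l : List Int) : pvIsMin (pvPairsP l) (pvPairs l none) := by
  have h0 : pvIsMin (fun _ => False) (none : Option Int) := fun d hd => hd
  have h := pvPairs_min l _ none h0
  apply pvIsMin_congr _ h
  intro d
  simp

-- the sorted dedup of l is strictly sorted and has the same members as l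
theorem pvSortedSet_strict (l : List Int) :
    (PySem.List.sorted (PySem.Set.ofList l) (fun x => x) false).Pairwise (· < ·) := by
  have hle : (PySem.List.sorted (PySem.Set.ofList l) (fun x => x) false).Pairwise (· ≤ ·) :=
    PySem.List.sorted_pairwise _ _
  have hnd : (PySem.List.sorted (PySem.Set.ofList l) (fun x => x) false).Nodup :=
    (PySem.List.sorted_perm _ _ _).nodup_iff.mpr (PySem.Set.nodup_ofList l)
  have := hle.and hnd
  exact this.imp (fun h => lt_of_le_of_ne h.1 h.2)

theorem pvSortedSet_mem (l : List Int) (x : Int) :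
    x ∈ l ↔ x ∈ PySem.List.sorted (PySem.Set.ofList l) (fun x => x) false := by
  rw [PySem.List.mem_sorted, PySem.Set.mem_ofList]

-- one window: A's cell computation equals B's cell computation, for any cell list l
theorem pvCell (l : List Int) :
    (if ((PySem.List.sorted (PySem.Set.ofList l) (fun x => x) false).length : Int) ≤ 1 then (0 : Int)
     else ((PySem.List.pyRange 1 ((PySem.List.sorted (PySem.Set.ofList l) (fun x => x) false).length : Int) 1).foldl
        (fun mini x => pvInfMin mini
          |PySem.List.pyGetD (PySem.List.sorted (PySem.Set.ofList l) (fun x => x) false) x 0 -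
           PySem.List.pyGetD (PySem.List.sorted (PySem.Set.ofList l) (fun x => x) false) (x - 1) 0|)
        none).getD 0)
    = (pvPairs l none).getD 0 := by
  have hB := pvPairs_isMin l
  have hstrict := pvSortedSet_strict l
  have hmem := pvSortedSet_mem l
  cases hs : PySem.List.sorted (PySem.Set.ofList l) (fun x => x) false with
  | nil =>
    rw [hs] at hmem
    rw [if_pos (by simp)]
    have hempty : ∀ d, ¬ pvPairsP l d := by
      rintro d ⟨x, hx, -⟩
      exact absurd ((hmem x).mp hx) (List.not_mem_nil)
    have : pvPairs l none = none := pvIsMin_unique hB (hempty : pvIsMin (pvPairsP l) none)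
    rw [this]
    rfl
  | cons a s =>
    rw [hs] at hstrict hmem
    cases s with
    | nil =>
      rw [if_pos (by simp)]
      have hempty : ∀ d, ¬ pvPairsP l d := by
        rintro d ⟨x, hx, y, hy, hne, -⟩
        have hx' := (hmem x).mp hx
        have hy' := (hmem y).mp hy
        simp only [List.mem_singleton] at hx' hy'
        exact hne (hx'.trans hy'.symm)
      have : pvPairs l none = none := pvIsMin_unique hB (hempty : pvIsMin (pvPairsP l) none)
      rw [this]
      rfl
    | cons b s' =>
      rw [if_neg (by simp only [List.length_cons]; push_cast; omega)]
      rw [pvIdxFold (b :: s') a none]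
      have hG : pvIsMin (pvGapsP a (b :: s')) (pvGfold a (b :: s') none) := by
        have h0 : pvIsMin (fun _ => False) (none : Option Int) := fun d hd => hd
        have h := pvGfold_isMin (b :: s') a _ none h0
        apply pvIsMin_congr _ h
        intro d
        simp
      have hP : pvIsMin (pvPairsP (a :: b :: s')) (pvGfold a (b :: s') none) :=
        pvGapsMin_to_PairsMin hstrict hG
      have hP' : pvIsMin (pvPairsP l) (pvGfold a (b :: s') none) :=
        pvIsMin_congr (fun d => (pvPairsP_congr (fun x => (hmem x).symm) d)) hP
      rw [pvIsMin_unique hP' hB]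

-- ===== VERDICT (by name: the statement is the Claim_ definition above) =====
theorem minAbsDiff_spec : Claim_equal_minAbsDiff := by
  intro grid k _ _
  unfold Spec_minAbsDiff
  simp only [minAbsDiff, minAbsDiff_alt]
  apply List.map_congr_left
  intro r hr
  apply List.map_congr_left
  intro c hc
  -- both window lists are literally the same list of cell values
  have hEq : (PySem.List.pyRange r (r + k) 1).foldl (fun acc i =>
        (PySem.List.pyRange c (c + k) 1).foldl (fun acc2 j =>
          acc2 ++ [PySem.List.pyGetD (PySem.List.pyGetD grid i []) j 0]) acc) []
      = (PySem.List.pyRange r (r + k) 1).flatMap (fun i =>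
          (PySem.List.pyRange c (c + k) 1).map (fun j =>
            PySem.List.pyGetD (PySem.List.pyGetD grid i []) j 0)) := by
    rw [PySem.List.foldl_congr_mem _ _
      (fun acc i => acc ++ (PySem.List.pyRange c (c + k) 1).map (fun j =>
        PySem.List.pyGetD (PySem.List.pyGetD grid i []) j 0)) _
      (by
        intro acc i _
        rw [PySem.List.foldl_append_singleton_eq_map])]
    rw [PySem.List.foldl_append_eq_flatMap]
    simp
  rw [hEq]
  by_cases hk1 : k = 1
  · subst hk1
    rw [if_pos rfl]
    rw [PySem.List.pyRange_one_singleton r, PySem.List.pyRange_one_singleton c]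
    rfl
  · rw [if_neg hk1]
    exact pvCell _
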